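-- pv_equiv track=rewrite | github.com/yugotakada/FWO-color-code | src/FWO_color_code_488_cond_error.py | reorder_list_len4_elements_z_meas_after
-- ===== SOURCE A (Python) =====
-- def reorder_list_len4_elements_z_meas_after(input_list):
--     output = []
--     for i in range(0, len(input_list), 4):
--         chunk = input_list[i:i + 4]
--         if len(chunk) == 4:
--             reordered_chunk = [chunk[3], chunk[1], chunk[0], chunk[2]]
--             output.extend(reordered_chunk)
--
--     return output
-- ===== SOURCE B (Python) =====
-- def reorder_list_len4_elements_z_meas_after(input_list):
--     perm = (3, 1, 0, 2)
--     n4 = len(input_list) - len(input_list) % 4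
--     return [input_list[j - j % 4 + perm[j % 4]] for j in range(n4)]
-- ===== Notes on version B (the rewrite author's own statement) =====
-- stated objective: alternative
-- what changed: B never forms chunks: it computes, for each flat output position j below the largest multiple of 4, the source index j - j%4 + perm[j%4] from a permutation table and builds the result in one comprehension, instead of A's slice-a-chunk-then-extend loop.
import Mathlib
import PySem

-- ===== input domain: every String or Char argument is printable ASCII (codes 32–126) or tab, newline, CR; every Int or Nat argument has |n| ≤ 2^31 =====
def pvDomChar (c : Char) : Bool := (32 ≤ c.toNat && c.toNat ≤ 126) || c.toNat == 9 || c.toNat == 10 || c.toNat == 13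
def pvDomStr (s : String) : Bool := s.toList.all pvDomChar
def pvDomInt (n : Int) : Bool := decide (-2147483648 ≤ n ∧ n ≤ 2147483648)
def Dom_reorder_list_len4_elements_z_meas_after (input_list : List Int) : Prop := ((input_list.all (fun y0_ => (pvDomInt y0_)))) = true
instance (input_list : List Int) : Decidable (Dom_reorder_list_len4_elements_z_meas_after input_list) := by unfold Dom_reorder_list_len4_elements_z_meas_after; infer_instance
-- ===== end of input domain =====

-- B drops A's chunk loop: it indexes the input directly with the closed-form source index
-- j - j%4 + perm[j%4] for each flat output position j (alternative decomposition; same O(n) cost).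
-- ===== PORT A =====
-- Literal port of A: foldl over range(0, len, 4); slice each chunk, guard len(chunk)==4, extend.
def reorder_list_len4_elements_z_meas_after (input_list : List Int) : List Int :=
  (PySem.List.pyRange 0 input_list.length 4).foldl
    (fun output i =>
      let chunk := PySem.List.slice input_list (some i) (some (i + 4))
      if chunk.length = 4 then
        output ++ [PySem.List.pyGetD chunk 3 0, PySem.List.pyGetD chunk 1 0,
                   PySem.List.pyGetD chunk 0 0, PySem.List.pyGetD chunk 2 0]
      else output) []

-- ===== PORT B =====
-- Port of B: n4 = len - len % 4; one comprehension over range(n4) reading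
-- input_list[j - j%4 + perm[j%4]] (pyGetD is exact here: every index is in range).
def reorder_list_len4_elements_z_meas_after_alt (input_list : List Int) : List Int :=
  let perm : List Int := [3, 1, 0, 2]
  let n4 : Int := (input_list.length : Int) - PySem.Int.mod (input_list.length : Int) 4
  (PySem.List.pyRange 0 n4 1).map (fun j =>
    PySem.List.pyGetD input_list
      (j - PySem.Int.mod j 4 + PySem.List.pyGetD perm (PySem.Int.mod j 4) 0) 0)

-- ===== PRECONDITION & SPEC =====
def Spec_reorder_list_len4_elements_z_meas_after (input_list : List Int) (out : List Int) : Prop := out = reorder_list_len4_elements_z_meas_after_alt input_list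
instance (input_list : List Int) (out : List Int) : Decidable (Spec_reorder_list_len4_elements_z_meas_after input_list out) := by unfold Spec_reorder_list_len4_elements_z_meas_after; infer_instance

-- ===== CLAIM (what is proved, stated in full; the proofs are below) =====
def Claim_equal_reorder_list_len4_elements_z_meas_after : Prop := ∀ (input_list : List Int), Dom_reorder_list_len4_elements_z_meas_after input_list → Spec_reorder_list_len4_elements_z_meas_after input_list (reorder_list_len4_elements_z_meas_after input_list)

-- ===== LEMMAS AND PROOFS =====

-- Proof-only helper: the common chunk recursion both ports are reduced to.
def pvChunks (xs : List Int) (out : List Int) : List Int :=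
  match xs with
  | w :: x :: y :: z :: rest => pvChunks rest (out ++ [z, x, w, y])
  | _ => out

lemma pyRange4_nil (a b : Int) (h : b ≤ a) : PySem.List.pyRange a b 4 = [] := by
  rw [PySem.List.pyRange_of_pos a b (by norm_num)]
  simp [show ¬ a < b by omega]

lemma pyRange4_cons (a b : Int) (h : a < b) :
    PySem.List.pyRange a b 4 = a :: PySem.List.pyRange (a + 4) b 4 := by
  rw [PySem.List.pyRange_of_pos a b (by norm_num),
      PySem.List.pyRange_of_pos (a + 4) b (by norm_num)]
  have hc : ((b - a + 4 - 1) / 4).toNat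
      = (if a + 4 < b then ((b - (a + 4) + 4 - 1) / 4).toNat else 0) + 1 := by
    split_ifs with h4 <;> omega
  rw [if_pos h, hc, List.range_succ_eq_map]
  simp only [List.map_cons, List.map_map]
  refine congrArg₂ (· :: ·) (by ring) ?_
  apply List.map_congr_left; intro k _; simp [Function.comp]; ring

lemma pyRange4_shift (a b : Int) :
    PySem.List.pyRange (a + 4) b 4 = (PySem.List.pyRange a (b - 4) 4).map (· + 4) := by
  rw [PySem.List.pyRange_of_pos (a + 4) b (by norm_num),
      PySem.List.pyRange_of_pos a (b - 4) (by norm_num)]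
  rw [List.map_map]
  have h1 : (a + 4 < b) ↔ (a < b - 4) := by omega
  simp only [show b - (a + 4) + 4 - 1 = b - 4 - a + 4 - 1 from by ring, h1]
  apply List.map_congr_left; intro k _; simp [Function.comp]; ring

-- A's foldl equals the chunk recursion.
lemma loopA : ∀ (xs acc : List Int),
    (PySem.List.pyRange 0 xs.length 4).foldl
      (fun output i =>
        let chunk := PySem.List.slice xs (some i) (some (i + 4))
        if chunk.length = 4 then
          output ++ [PySem.List.pyGetD chunk 3 0, PySem.List.pyGetD chunk 1 0,
                     PySem.List.pyGetD chunk 0 0, PySem.List.pyGetD chunk 2 0]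
        else output) acc
    = pvChunks xs acc := by
  intro xs acc
  induction xs, acc using pvChunks.induct with
  | case1 acc w x y z rest ih =>
    have hlen : (((w :: x :: y :: z :: rest).length : Nat) : Int) = (rest.length : Int) + 4 := by
      push_cast [List.length_cons]; ring
    rw [hlen, pyRange4_cons 0 _ (by positivity), List.foldl_cons,
        pyRange4_shift 0 ((rest.length : Int) + 4),
        show (rest.length : Int) + 4 - 4 = (rest.length : Int) from by ring,
        List.foldl_map]
    rw [PySem.List.foldl_congr_mem _ _
      (fun output i =>
        let chunk := PySem.List.slice rest (some i) (some (i + 4))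
        if chunk.length = 4 then
          output ++ [PySem.List.pyGetD chunk 3 0, PySem.List.pyGetD chunk 1 0,
                     PySem.List.pyGetD chunk 0 0, PySem.List.pyGetD chunk 2 0]
        else output) _
      (by
        intro acc' i hi
        have hi0 : 0 ≤ i := ((PySem.List.mem_pyRange_iff_of_pos (by norm_num) i).mp hi).1
        have hsl : PySem.List.slice (w :: x :: y :: z :: rest) (some (i + 4)) (some (i + 4 + 4))
            = PySem.List.slice rest (some i) (some (i + 4)) := by
          rw [PySem.List.slice_toNat _ (by omega) (by omega),
              PySem.List.slice_toNat _ hi0 (by omega)]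
          have h4 : (i + 4).toNat = i.toNat + 4 := by omega
          have h8 : (i + 4 + 4).toNat = i.toNat + 8 := by omega
          have hd : (w :: x :: y :: z :: rest).drop (i.toNat + 4) = rest.drop i.toNat := by
            rw [show i.toNat + 4 = i.toNat.succ.succ.succ.succ from rfl]
            simp [List.drop_succ_cons]
          rw [h4, h8, hd, show i.toNat + 8 - (i.toNat + 4) = 4 from by omega,
              show i.toNat + 4 - i.toNat = 4 from by omega]
        simp only [hsl])]
    have hchunk : PySem.List.slice (w :: x :: y :: z :: rest) none (some 4) = [w, x, y, z] := by
      rw [PySem.List.slice_to _ (by norm_num), show (4 : Int).toNat = 4 from rfl]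
      simp
    have hinit : (let chunk := PySem.List.slice (w :: x :: y :: z :: rest) (some 0) (some ((0 : Int) + 4))
        if chunk.length = 4 then
          acc ++ [PySem.List.pyGetD chunk 3 0, PySem.List.pyGetD chunk 1 0,
                  PySem.List.pyGetD chunk 0 0, PySem.List.pyGetD chunk 2 0]
        else acc) = acc ++ [z, x, w, y] := by
      norm_num [hchunk, PySem.List.pyGetD, PySem.List.pyGet?, PySem.List.pyIdx?]
      exact ⟨rfl, rfl⟩
    rw [hinit, show pvChunks (w :: x :: y :: z :: rest) acc = pvChunks rest (acc ++ [z, x, w, y]) from rfl]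
    exact ih
  | case2 xs acc h =>
    have hlt : xs.length < 4 := by
      rcases xs with _ | ⟨a, _ | ⟨b, _ | ⟨c, _ | ⟨d, r⟩⟩⟩⟩ <;> simp_all
      exact absurd (h a b c d r rfl) (by simp)
    have halt : pvChunks xs acc = acc := by
      rcases xs with _ | ⟨a, _ | ⟨b, _ | ⟨c, _ | ⟨d, r⟩⟩⟩⟩ <;> simp_all [pvChunks]
      exact absurd (h a b c d r rfl) (by simp)
    rcases Nat.eq_zero_or_pos xs.length with h0 | hpos
    · rw [h0, halt]
      norm_num [pyRange4_nil 0 0 le_rfl]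
    · rw [pyRange4_cons 0 _ (by exact_mod_cast hpos),
          pyRange4_nil _ _ (by push_cast; omega),
          List.foldl_cons, List.foldl_nil]
      have hchunk : PySem.List.slice xs none (some 4) = xs := by
        rw [PySem.List.slice_to _ (by norm_num)]
        exact List.take_of_length_le (by omega)
      simp [hchunk, halt, show xs.length ≠ 4 by omega]

-- B in List.range form.
lemma alt_eq_range (xs : List Int) :
    reorder_list_len4_elements_z_meas_after_alt xs
    = (List.range (xs.length - xs.length % 4)).map (fun (k : Nat) =>
        PySem.List.pyGetD xs
          ((k : Int) - PySem.Int.mod (k : Int) 4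
            + PySem.List.pyGetD [3, 1, 0, 2] (PySem.Int.mod (k : Int) 4) 0) 0) := by
  unfold reorder_list_len4_elements_z_meas_after_alt
  have hmod : PySem.Int.mod (xs.length : Int) 4 = ((xs.length % 4 : Nat) : Int) :=
    PySem.Int.mod_natCast _ _
  simp only [hmod, show ((xs.length : Int) - ((xs.length % 4 : Nat) : Int))
      = ((xs.length - xs.length % 4 : Nat) : Int) from by
    have := Nat.mod_le xs.length 4; push_cast [this]; ring]
  rw [PySem.List.pyRange_one, List.map_map]
  have ht : (((xs.length - xs.length % 4 : Nat) : Int) - 0).toNat = xs.length - xs.length % 4 := by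
    omega
  rw [ht]
  apply List.map_congr_left
  intro k _
  simp [Function.comp]

lemma alt_short (xs : List Int) (h : xs.length < 4) :
    reorder_list_len4_elements_z_meas_after_alt xs = [] := by
  rw [alt_eq_range, show xs.length - xs.length % 4 = 0 from by omega]
  simp

lemma pyGetD_cons4 (w x y z : Int) (l : List Int) (i : Int) (h : 0 ≤ i) (d : Int) :
    PySem.List.pyGetD (w :: x :: y :: z :: l) (i + 4) d = PySem.List.pyGetD l i d := by
  rw [show i = ((i.toNat : Nat) : Int) from by omega,
      show ((i.toNat : Nat) : Int) + 4 = ((i.toNat + 4 : Nat) : Int) from by push_cast; ring]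
  rw [PySem.List.pyGetD_natCast, PySem.List.pyGetD_natCast]
  rw [show i.toNat + 4 = i.toNat.succ.succ.succ.succ from rfl]
  simp

lemma alt_cons (w x y z : Int) (rest : List Int) :
    reorder_list_len4_elements_z_meas_after_alt (w :: x :: y :: z :: rest)
    = z :: x :: w :: y :: reorder_list_len4_elements_z_meas_after_alt rest := by
  rw [alt_eq_range, alt_eq_range]
  have hlen : (w :: x :: y :: z :: rest).length = rest.length + 4 := by simp
  have hmod : (rest.length + 4) % 4 = rest.length % 4 := by omega
  have hn4 : (w :: x :: y :: z :: rest).length - (w :: x :: y :: z :: rest).length % 4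
      = 4 + (rest.length - rest.length % 4) := by
    rw [hlen, hmod]; omega
  rw [hn4, List.range_add, List.map_append, List.map_map]
  have hfront : (List.range 4).map (fun (k : Nat) =>
      PySem.List.pyGetD (w :: x :: y :: z :: rest)
        ((k : Int) - PySem.Int.mod (k : Int) 4
          + PySem.List.pyGetD [3, 1, 0, 2] (PySem.Int.mod (k : Int) 4) 0) 0)
      = [z, x, w, y] := by
    simp [List.range_succ, PySem.Int.mod, PySem.List.pyGetD, PySem.List.pyGet?,
          PySem.List.pyIdx?]
    refine ⟨?_, ?_, ?_, ?_⟩ <;> (rw [if_pos (by omega)]; simp)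
  rw [hfront]
  have htail : ∀ k ∈ List.range (rest.length - rest.length % 4),
      ((fun (k : Nat) =>
        PySem.List.pyGetD (w :: x :: y :: z :: rest)
          ((k : Int) - PySem.Int.mod (k : Int) 4
            + PySem.List.pyGetD [3, 1, 0, 2] (PySem.Int.mod (k : Int) 4) 0) 0) ∘ (fun x => 4 + x)) k
      = (fun (k : Nat) =>
        PySem.List.pyGetD rest
          ((k : Int) - PySem.Int.mod (k : Int) 4
            + PySem.List.pyGetD [3, 1, 0, 2] (PySem.Int.mod (k : Int) 4) 0) 0) k := by
    intro k hk
    simp only [Function.comp]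
    have hm4 : ∀ n : Nat, PySem.Int.mod ((n : Nat) : Int) 4 = ((n % 4 : Nat) : Int) := by
      intro n
      exact_mod_cast PySem.Int.mod_natCast n 4
    have hm : PySem.Int.mod ((4 + k : Nat) : Int) 4 = PySem.Int.mod ((k : Nat) : Int) 4 := by
      rw [hm4, hm4, show (4 + k) % 4 = k % 4 from by omega]
    have hcast : ((4 + k : Nat) : Int) = ((k : Nat) : Int) + 4 := by push_cast; ring
    rw [hm, hcast, hm4]
    have hr : k % 4 = 0 ∨ k % 4 = 1 ∨ k % 4 = 2 ∨ k % 4 = 3 := by omega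
    rcases hr with h0 | h0 | h0 | h0
    · rw [h0]
      simp only [PySem.List.pyGetD_natCast]
      norm_num
      rw [show (k : Int) + 4 + 3 = ((k : Int) + 3) + 4 from by ring]
      exact pyGetD_cons4 _ _ _ _ _ _ (by positivity) 0
    · rw [h0]
      simp only [PySem.List.pyGetD_natCast]
      norm_num
      rw [pyGetD_cons4 w x y z rest (k : Int) (by positivity) 0]
      simp
    · rw [h0]
      simp only [PySem.List.pyGetD_natCast]
      norm_num
      rw [show (k : Int) + 4 - 2 = ((k : Int) - 2) + 4 from by ring]
      exact pyGetD_cons4 _ _ _ _ _ _ (by omega) 0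
    · rw [h0]
      simp only [PySem.List.pyGetD_natCast]
      norm_num
      rw [show (k : Int) + 4 - 3 + 2 = ((k : Int) - 3 + 2) + 4 from by ring]
      exact pyGetD_cons4 _ _ _ _ _ _ (by omega) 0
  rw [List.map_congr_left htail]
  rfl

lemma chunks_alt : ∀ (xs acc : List Int),
    pvChunks xs acc = acc ++ reorder_list_len4_elements_z_meas_after_alt xs := by
  intro xs acc
  induction xs, acc using pvChunks.induct with
  | case1 acc w x y z rest ih =>
    rw [show pvChunks (w :: x :: y :: z :: rest) acc = pvChunks rest (acc ++ [z, x, w, y]) from rfl,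
        ih, alt_cons, List.append_assoc]
    rfl
  | case2 xs acc h =>
    have hlt : xs.length < 4 := by
      rcases xs with _ | ⟨a, _ | ⟨b, _ | ⟨c, _ | ⟨d, r⟩⟩⟩⟩ <;> simp_all
      exact absurd (h a b c d r rfl) (by simp)
    have halt : pvChunks xs acc = acc := by
      rcases xs with _ | ⟨a, _ | ⟨b, _ | ⟨c, _ | ⟨d, r⟩⟩⟩⟩ <;> simp_all [pvChunks]
      exact absurd (h a b c d r rfl) (by simp)
    rw [halt, alt_short xs hlt, List.append_nil]

-- ===== VERDICT (by name: the statement is the Claim_ definition above) =====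
theorem reorder_list_len4_elements_z_meas_after_spec : Claim_equal_reorder_list_len4_elements_z_meas_after := by
  intro xs _
  unfold Spec_reorder_list_len4_elements_z_meas_after reorder_list_len4_elements_z_meas_after
  rw [loopA xs [], chunks_alt xs []]
  rfl
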